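-- pv_equiv track=rewrite | github.com/IgorPolst/Stepik | Level_profi/Iterators_and_generators/Genetator/step_2.py | alternating_sequence
-- ===== SOURCE A (Python) =====
-- def alternating_sequence(count=None):
--     num = 1  # начинаем с 1
--
--     if count is None:
--         while True:
--             yield num
--             num = -num - 1 if num > 0 else -num + 1
--     else:
--         for _ in range(count):
--             yield num
--             num = -num - 1 if num > 0 else -num + 1
-- ===== SOURCE B (Python) =====
-- def alternating_sequence(count=None):
--     # each term computed directly from its index: i -> (i+1) with sign = (-1)^i
--     if count is None:
--         i = 0
--         while True:
--             yield i + 1 if i % 2 == 0 else -(i + 1)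
--             i += 1
--     else:
--         for i in range(count):
--             yield i + 1 if i % 2 == 0 else -(i + 1)
-- ===== Notes on version B (the rewrite author's own statement) =====
-- stated objective: alternative
-- what changed: B computes each term directly from its loop index by a closed form ((i+1) with alternating sign) instead of maintaining A's running accumulator updated by the recurrence num -> -num-1 / -num+1.
import Mathlib
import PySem

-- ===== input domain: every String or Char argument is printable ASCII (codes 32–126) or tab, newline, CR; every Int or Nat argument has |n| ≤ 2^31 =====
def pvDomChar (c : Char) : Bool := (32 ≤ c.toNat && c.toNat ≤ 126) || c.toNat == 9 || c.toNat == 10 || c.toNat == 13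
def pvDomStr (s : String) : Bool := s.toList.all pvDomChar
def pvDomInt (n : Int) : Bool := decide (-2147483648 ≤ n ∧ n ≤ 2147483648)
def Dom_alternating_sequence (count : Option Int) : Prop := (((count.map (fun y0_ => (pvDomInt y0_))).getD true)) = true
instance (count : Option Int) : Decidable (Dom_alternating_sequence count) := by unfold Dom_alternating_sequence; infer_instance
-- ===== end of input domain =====

-- B computes each yielded term directly from its loop index (closed form (i+1) with alternating
-- sign) instead of A's running accumulator updated by the recurrence num -> -num-1 / -num+1.
-- Pre_ excludes count = none, where the Python generator is infinite (no finite list of yields).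


-- ===== PORT A =====
-- for each of range(count) steps: yield num, then num := -num-1 if num>0 else -num+1
def alternating_sequence (count : Option Int) : List Int :=
  match count with
  | none => []   -- unreachable under Pre_: the Python generator is infinite here
  | some c =>
    ((PySem.List.pyRange 0 c 1).foldl
      (fun (s : Int × List Int) _ =>
        (if s.1 > 0 then -s.1 - 1 else -s.1 + 1, s.2 ++ [s.1]))
      ((1 : Int), [])).2

-- ===== PORT B =====
-- for i in range(count): yield i+1 if i % 2 == 0 else -(i+1)
def alternating_sequence_alt (count : Option Int) : List Int :=
  match count with
  | none => []   -- unreachable under Pre_: the Python generator is infinite here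
  | some c =>
    (PySem.List.pyRange 0 c 1).map
      (fun i => if PySem.Int.mod i 2 = 0 then i + 1 else -(i + 1))

-- ===== PRECONDITION & SPEC =====
-- Pre_ excludes count = None: there the Python generator never terminates, so no finite
-- list of yields exists to compare.
def Pre_alternating_sequence (count : Option Int) : Prop := count.isSome = true
instance (count : Option Int) : Decidable (Pre_alternating_sequence count) := by
  unfold Pre_alternating_sequence; infer_instance

def pvWitness_alternating_sequence : Option Int := some 6

def Spec_alternating_sequence (count : Option Int) (out : List Int) : Prop := out = alternating_sequence_alt count
instance (count : Option Int) (out : List Int) : Decidable (Spec_alternating_sequence count out) := by unfold Spec_alternating_sequence; infer_instance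

-- ===== CLAIM (what is proved, stated in full; the proofs are below) =====
def Claim_equal_alternating_sequence : Prop := ∀ (count : Option Int), Dom_alternating_sequence count → Pre_alternating_sequence count → Spec_alternating_sequence count (alternating_sequence count)

-- ===== LEMMAS AND PROOFS =====

-- the closed-form term at index k
def pvTerm (k : Nat) : Int := if k % 2 = 0 then (k : Int) + 1 else -((k : Int) + 1)

-- A's loop state after n steps: accumulator value and emitted list
theorem pvFoldA (n : Nat) :
    (List.range n).foldl
      (fun (s : Int × List Int) (_ : Nat) =>
        (if s.1 > 0 then -s.1 - 1 else -s.1 + 1, s.2 ++ [s.1]))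
      ((1 : Int), [])
    = (pvTerm n, (List.range n).map pvTerm) := by
  induction n with
  | zero => simp [pvTerm]
  | succ n ih =>
    rw [List.range_succ, List.foldl_append, ih]
    simp only [List.foldl_cons, List.foldl_nil, List.map_append, List.map_cons, List.map_nil]
    refine Prod.ext ?_ rfl
    simp only [pvTerm]
    rcases Nat.even_or_odd n with h | h
    · have he : n % 2 = 0 := Nat.even_iff.mp h
      have ho : (n + 1) % 2 = 1 := by omega
      rw [he, ho]; norm_num; ring
    · have ho : n % 2 = 1 := Nat.odd_iff.mp h
      have he : (n + 1) % 2 = 0 := by omega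
      rw [ho, he]; norm_num

theorem pvTerm_eq (k : Nat) :
    (if PySem.Int.mod ((0 : Int) + (k : Int)) 2 = 0 then (0 : Int) + (k : Int) + 1
     else -((0 : Int) + (k : Int) + 1)) = pvTerm k := by
  have h : PySem.Int.mod ((0 : Int) + (k : Int)) 2 = ((k % 2 : Nat) : Int) := by
    rw [zero_add]; exact_mod_cast PySem.Int.mod_natCast k 2
  rw [h, pvTerm]
  rcases Nat.even_or_odd k with hk | hk
  · have : k % 2 = 0 := Nat.even_iff.mp hk
    simp [this]
  · have : k % 2 = 1 := Nat.odd_iff.mp hk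
    simp [this]

-- ===== VERDICT (by name: the statement is the Claim_ definition above) =====
theorem alternating_sequence_spec : Claim_equal_alternating_sequence := by
  intro count _ hpre
  cases count with
  | none => exact absurd hpre (by simp [Pre_alternating_sequence])
  | some c =>
    unfold Spec_alternating_sequence
    simp only [alternating_sequence, alternating_sequence_alt]
    rw [PySem.List.pyRange_one 0 c]
    rw [List.foldl_map, List.map_map]
    rw [pvFoldA (c - 0).toNat]
    exact (List.map_congr_left (fun k _ => pvTerm_eq k)).symm
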